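-- pv_equiv track=rewrite | github.com/l4uZP/python-practice | coin_flip_streaks_with_tests/coinFlipStreaks.py | CountTsAndHs
-- ===== SOURCE A (Python) =====
-- def CountTsAndHs(flips):
--     h = 0
--     t = 0
--     for side in flips:
--         if side == "T":
--             t +=1
--         elif side == "H":
--             h +=1
--     return t, h
-- ===== SOURCE B (Python) =====
-- def CountTsAndHs(flips):
--     flips = list(flips)
--     return flips.count("T"), flips.count("H")
-- ===== Notes on version B (the rewrite author's own statement) =====
-- stated objective: idiomatic
-- what changed: Replaced the single loop maintaining two scalar counters with if/elif branches by two list.count library scans, one per face.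
import Mathlib
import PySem

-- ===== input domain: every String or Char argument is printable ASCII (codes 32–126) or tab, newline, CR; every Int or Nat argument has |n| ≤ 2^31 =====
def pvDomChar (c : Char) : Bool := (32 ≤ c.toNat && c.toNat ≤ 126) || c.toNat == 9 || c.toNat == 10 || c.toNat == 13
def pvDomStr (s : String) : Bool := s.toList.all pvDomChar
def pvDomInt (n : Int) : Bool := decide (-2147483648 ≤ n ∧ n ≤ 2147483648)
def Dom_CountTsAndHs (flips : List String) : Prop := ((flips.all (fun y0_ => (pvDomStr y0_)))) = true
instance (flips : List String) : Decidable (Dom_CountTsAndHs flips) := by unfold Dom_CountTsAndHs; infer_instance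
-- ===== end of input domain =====

-- B counts each face with a library count scan instead of A's single loop with two scalar counters (idiomatic; same cost).


-- ===== PORT A =====
-- loop over flips keeping the two scalar counters (h, t); returns (t, h)
def CountTsAndHs (flips : List String) : Int × Int :=
  let st := flips.foldl (fun (ht : Int × Int) side =>
    if side == "T" then (ht.1, ht.2 + 1)
    else if side == "H" then (ht.1 + 1, ht.2)
    else ht) (0, 0)
  (st.2, st.1)

-- ===== PORT B =====
def CountTsAndHs_alt (flips : List String) : Int × Int :=
  ((PySem.List.count flips "T" : Int), (PySem.List.count flips "H" : Int))

-- ===== PRECONDITION & SPEC =====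
def Spec_CountTsAndHs (flips : List String) (out : Int × Int) : Prop := out = CountTsAndHs_alt flips
instance (flips : List String) (out : Int × Int) : Decidable (Spec_CountTsAndHs flips out) := by unfold Spec_CountTsAndHs; infer_instance

-- ===== CLAIM (what is proved, stated in full; the proofs are below) =====
def Claim_equal_CountTsAndHs : Prop := ∀ (flips : List String), Dom_CountTsAndHs flips → Spec_CountTsAndHs flips (CountTsAndHs flips)

-- ===== LEMMAS AND PROOFS =====
theorem CountTsAndHs_foldl (flips : List String) (h t : Int) :
    flips.foldl (fun (ht : Int × Int) side =>
      if side == "T" then (ht.1, ht.2 + 1)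
      else if side == "H" then (ht.1 + 1, ht.2)
      else ht) (h, t)
    = (h + (PySem.List.count flips "H" : Int), t + (PySem.List.count flips "T" : Int)) := by
  induction flips generalizing h t with
  | nil => simp [PySem.List.count]
  | cons x xs ih =>
      simp only [beq_iff_eq] at ih
      simp only [List.foldl_cons, beq_iff_eq]
      by_cases hx : x = "T"
      · rw [if_pos hx, ih]
        subst hx
        simp [PySem.List.count, List.count_cons]
        ring
      · by_cases hy : x = "H"
        · rw [if_neg hx, if_pos hy, ih]
          subst hy
          simp [PySem.List.count, List.count_cons, hx]
          ring
        · rw [if_neg hx, if_neg hy, ih]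
          simp [PySem.List.count, List.count_cons]
          exact ⟨hy, hx⟩

-- ===== VERDICT (by name: the statement is the Claim_ definition above) =====
theorem CountTsAndHs_spec : Claim_equal_CountTsAndHs := by
  intro flips _
  unfold Spec_CountTsAndHs CountTsAndHs CountTsAndHs_alt
  rw [CountTsAndHs_foldl]
  simp
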